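-- pv_equiv track=rewrite | github.com/rickymoorhouse/blog | scripts/find_unused_css.py | is_interaction_selector
-- ===== SOURCE A (Python) =====
-- def is_interaction_selector(selector):
--     """Check if selector requires user interaction or state (hover, focus, etc.)."""
--     interaction = {
--         ':hover', ':focus', ':active', ':visited', ':focus-within', ':focus-visible',
--         ':checked', ':disabled', ':enabled', ':required', ':optional', ':valid',
--         ':invalid', ':placeholder-shown', ':target', ':lang(', ':not(:',
--         '::placeholder', '::selection', '::first-line', '::first-letter',
--         '::backdrop', '::file-selector-button',
--     }
--     selector_lower = selector.lower().strip()
--     for pseudo in interaction: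
--         if pseudo in selector_lower:
--             return True
--     return False
-- ===== SOURCE B (Python) =====
-- _TOKENS = (
--     ':hover', ':focus', ':active', ':visited', ':focus-within', ':focus-visible',
--     ':checked', ':disabled', ':enabled', ':required', ':optional', ':valid',
--     ':invalid', ':placeholder-shown', ':target', ':lang(', ':not(:',
--     '::placeholder', '::selection', '::first-line', '::first-letter',
--     '::backdrop', '::file-selector-button',
-- )
--
--
-- def is_interaction_selector(selector):
--     """Single left-to-right scan: only at ':' positions, test whether some
--     interaction token starts there (every token begins with ':')."""
--     s = selector.lower().strip()
--     for i in range(len(s)):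
--         if s[i] == ':' and any(s.startswith(t, i) for t in _TOKENS):
--             return True
--     return False
-- ===== Notes on version B (the rewrite author's own statement) =====
-- stated objective: alternative
-- what changed: A runs 23 independent whole-string substring scans, one per interaction token; B makes a single left-to-right scan of the selector and, only at colon positions, tests the tokens as prefixes there (every interaction token begins with a colon).
import Mathlib
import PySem

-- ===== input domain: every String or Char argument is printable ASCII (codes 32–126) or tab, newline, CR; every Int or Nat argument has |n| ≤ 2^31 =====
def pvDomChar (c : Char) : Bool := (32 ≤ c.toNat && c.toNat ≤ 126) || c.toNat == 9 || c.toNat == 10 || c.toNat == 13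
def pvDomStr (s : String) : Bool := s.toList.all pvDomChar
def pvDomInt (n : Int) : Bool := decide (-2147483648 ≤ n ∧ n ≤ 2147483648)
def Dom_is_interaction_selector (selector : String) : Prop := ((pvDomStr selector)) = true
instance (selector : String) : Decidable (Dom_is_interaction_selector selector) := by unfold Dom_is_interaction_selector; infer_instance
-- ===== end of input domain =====

-- B replaces A's 23 independent substring scans by a single left-to-right scan that
-- tests tokens only at ':' positions (objective: alternative; every token starts with ':').

-- the interaction tokens, in A's literal order (set-iteration order is irrelevant: the loop is an OR)
def pvTokens : List (List Char) :=
  [":hover".toList, ":focus".toList, ":active".toList, ":visited".toList,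
   ":focus-within".toList, ":focus-visible".toList, ":checked".toList,
   ":disabled".toList, ":enabled".toList, ":required".toList, ":optional".toList,
   ":valid".toList, ":invalid".toList, ":placeholder-shown".toList, ":target".toList,
   ":lang(".toList, ":not(:".toList, "::placeholder".toList, "::selection".toList,
   "::first-line".toList, "::first-letter".toList, "::backdrop".toList,
   "::file-selector-button".toList]

-- ===== PORT A =====
-- A's loop: for pseudo in interaction: if pseudo in selector_lower: return True
def pvALoop (ts : List (List Char)) (s : List Char) : Bool :=
  match ts with
  | [] => false
  | p :: rest => if PySem.Chars.isIn p s then true else pvALoop rest s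

def is_interaction_selector (selector : String) : Bool :=
  pvALoop pvTokens (PySem.Chars.strip (PySem.Chars.lower selector.toList))

-- ===== PORT B =====
-- B's loop over positions i (here: suffixes of s): at a ':' test each token as a prefix
def pvBLoop (s : List Char) : Bool :=
  match s with
  | [] => false
  | c :: rest =>
      (c == ':' && pvTokens.any (fun t => PySem.Chars.startswith (c :: rest) t))
      || pvBLoop rest

def is_interaction_selector_alt (selector : String) : Bool :=
  pvBLoop (PySem.Chars.strip (PySem.Chars.lower selector.toList))

-- ===== PRECONDITION & SPEC =====
def Spec_is_interaction_selector (selector : String) (out : Bool) : Prop := out = is_interaction_selector_alt selector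
instance (selector : String) (out : Bool) : Decidable (Spec_is_interaction_selector selector out) := by unfold Spec_is_interaction_selector; infer_instance

-- ===== CLAIM (what is proved, stated in full; the proofs are below) =====
def Claim_equal_is_interaction_selector : Prop := ∀ (selector : String), Dom_is_interaction_selector selector → Spec_is_interaction_selector selector (is_interaction_selector selector)

-- ===== LEMMAS AND PROOFS =====

theorem pvTokens_head : ∀ t ∈ pvTokens, t.head? = some ':' := by decide

theorem pvALoop_eq_true_iff (ts : List (List Char)) (s : List Char) :
    pvALoop ts s = true ↔ ∃ t ∈ ts, t <:+: s := by
  induction ts with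
  | nil => simp [pvALoop]
  | cons p rest ih =>
      simp only [pvALoop]
      by_cases h : PySem.Chars.isIn p s = true
      · simp [h, (PySem.Chars.isIn_iff_infix p s).mp h]
      · have h' : ¬ p <:+: s := (PySem.Chars.isIn_eq_false_iff p s).mp (by simpa using h)
        simp [h, ih, h']

theorem pvBLoop_eq_true_iff (s : List Char) :
    pvBLoop s = true ↔ ∃ t ∈ pvTokens, t <:+: s := by
  induction s with
  | nil =>
      simp only [pvBLoop]
      constructor
      · intro h; exact absurd h (by simp)
      · rintro ⟨t, ht, hinf⟩
        have hnil : t = [] := List.eq_nil_of_infix_nil hinf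
        have hh := pvTokens_head t ht
        rw [hnil] at hh
        simp at hh
  | cons c rest ih =>
      simp only [pvBLoop, Bool.or_eq_true, Bool.and_eq_true, List.any_eq_true, ih]
      constructor
      · rintro (⟨_, t, ht, hsw⟩ | ⟨t, ht, hinf⟩)
        · exact ⟨t, ht, (PySem.Chars.startswith_iff _ _).mp hsw |>.isInfix⟩
        · exact ⟨t, ht, (List.infix_cons hinf)⟩
      · rintro ⟨t, ht, hinf⟩
        rcases List.infix_cons_iff.mp hinf with hpre | hinf'
        · left
          have hh := pvTokens_head t ht
          obtain ⟨u, rfl⟩ : ∃ u, t = ':' :: u := by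
            cases t with
            | nil => simp at hh
            | cons a u => exact ⟨u, by simp_all⟩
          have hc : c = ':' := ((List.cons_prefix_cons).mp hpre).1.symm
          refine ⟨by simp [hc], ':' :: u, ht, (PySem.Chars.startswith_iff _ _).mpr hpre⟩
        · exact Or.inr ⟨t, ht, hinf'⟩

-- ===== VERDICT (by name: the statement is the Claim_ definition above) =====
theorem is_interaction_selector_spec : Claim_equal_is_interaction_selector := by
  intro selector _
  unfold Spec_is_interaction_selector is_interaction_selector is_interaction_selector_alt
  set s := PySem.Chars.strip (PySem.Chars.lower selector.toList)
  have := pvALoop_eq_true_iff pvTokens s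
  have := pvBLoop_eq_true_iff s
  rw [show (pvALoop pvTokens s = pvBLoop s) ↔ (pvALoop pvTokens s = true ↔ pvBLoop s = true) from
    ⟨fun h => by rw [h], fun h => by cases hA : pvALoop pvTokens s <;> cases hB : pvBLoop s <;> simp_all⟩]
  rw [pvALoop_eq_true_iff, pvBLoop_eq_true_iff]
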